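-- pv_equiv track=rewrite | github.com/jramaswami/Binary_Search_Python | uber_pool.py | solve
-- ===== SOURCE A (Python) =====
-- import collections
--
-- Event = collections.namedtuple('Event', ['x', 'delta'])
--
-- def solve(trips, capacity):
--     events = []
--     for start_x, end_x, num_passengers in trips:
--         events.append(Event(start_x, num_passengers))
--         events.append(Event(end_x, -num_passengers))
--     events.sort()
--     curr_passengers = 0
--     for event in events:
--         curr_passengers += event.delta
--         if curr_passengers > capacity:
--             return False
--     return True
-- ===== SOURCE B (Python) =====
-- def solve(trips, capacity):
--     starts = sorted((s, n) for s, e, n in trips)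
--     ends = sorted((e, -n) for s, e, n in trips)
--     curr = 0
--     i = j = 0
--     while i < len(starts) or j < len(ends):
--         if i >= len(starts) or (j < len(ends) and ends[j] <= starts[i]):
--             curr += ends[j][1]
--             j += 1
--         else:
--             curr += starts[i][1]
--             i += 1
--         if curr > capacity:
--             return False
--     return True
-- ===== Notes on version B (the rewrite author's own statement) =====
-- stated objective: alternative
-- what changed: Instead of sorting one merged pickup/drop-off event list and scanning it, B sorts pickups and drop-offs separately and runs a two-pointer merge over the two sorted lists, checking capacity on the fly.
import Mathlib
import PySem

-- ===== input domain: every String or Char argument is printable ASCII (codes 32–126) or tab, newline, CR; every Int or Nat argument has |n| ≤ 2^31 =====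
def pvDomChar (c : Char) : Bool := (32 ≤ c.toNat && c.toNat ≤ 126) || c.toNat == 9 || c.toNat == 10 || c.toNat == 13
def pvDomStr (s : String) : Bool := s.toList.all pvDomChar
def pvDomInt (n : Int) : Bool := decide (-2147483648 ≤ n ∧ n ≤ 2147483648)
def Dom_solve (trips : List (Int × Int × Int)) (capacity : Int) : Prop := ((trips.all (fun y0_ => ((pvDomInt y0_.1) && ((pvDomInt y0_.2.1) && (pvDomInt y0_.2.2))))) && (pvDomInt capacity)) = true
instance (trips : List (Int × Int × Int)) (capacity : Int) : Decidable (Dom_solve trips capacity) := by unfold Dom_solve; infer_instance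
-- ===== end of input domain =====

-- B replaces A's single sorted event list by two separately sorted lists (pickups, drop-offs)
-- walked with a two-pointer merge; alternative decomposition, same asymptotic cost.

-- ===== PORT A =====
-- 'for event in events: curr += delta; if curr > capacity: return False' with early return
def loopA (capacity : Int) : Int → List (Int × Int) → Bool
  | _, [] => true
  | curr, e :: rest =>
      let c := curr + e.2
      if c > capacity then false else loopA capacity c rest

def solve (trips : List (Int × Int × Int)) (capacity : Int) : Bool :=
  -- events.append(Event(start_x, num)); events.append(Event(end_x, -num)); events.sort()
  let events := trips.foldl (fun acc t => (acc ++ [(t.1, t.2.2)]) ++ [(t.2.1, -t.2.2)]) []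
  let sortedEvents := PySem.List.sorted2 events Prod.fst Prod.snd
  loopA capacity 0 sortedEvents

-- ===== PORT B =====
-- the fused two-pointer while loop of Source B: take the next event from 'ends' when starts are
-- exhausted or ends[j] <= starts[i] (tuple order), else from 'starts'; check after each step
def mergeGo (capacity : Int) : Int → List (Int × Int) → List (Int × Int) → Bool
  | _, [], [] => true
  | curr, [], e :: es =>
      let c := curr + e.2
      if c > capacity then false else mergeGo capacity c [] es
  | curr, s :: ss, [] =>
      let c := curr + s.2
      if c > capacity then false else mergeGo capacity c ss []
  | curr, s :: ss, e :: es =>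
      if e.1 < s.1 ∨ (e.1 = s.1 ∧ e.2 ≤ s.2) then
        let c := curr + e.2
        if c > capacity then false else mergeGo capacity c (s :: ss) es
      else
        let c := curr + s.2
        if c > capacity then false else mergeGo capacity c ss (e :: es)

def solve_alt (trips : List (Int × Int × Int)) (capacity : Int) : Bool :=
  let starts := PySem.List.sorted2 (trips.map (fun t => (t.1, t.2.2))) Prod.fst Prod.snd
  let ends := PySem.List.sorted2 (trips.map (fun t => (t.2.1, -t.2.2))) Prod.fst Prod.snd
  mergeGo capacity 0 starts ends

-- ===== PRECONDITION & SPEC =====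
def Spec_solve (trips : List (Int × Int × Int)) (capacity : Int) (out : Bool) : Prop := out = solve_alt trips capacity
instance (trips : List (Int × Int × Int)) (capacity : Int) (out : Bool) : Decidable (Spec_solve trips capacity out) := by unfold Spec_solve; infer_instance

-- ===== CLAIM (what is proved, stated in full; the proofs are below) =====
def Claim_equal_solve : Prop := ∀ (trips : List (Int × Int × Int)) (capacity : Int), Dom_solve trips capacity → Spec_solve trips capacity (solve trips capacity)

-- ===== LEMMAS AND PROOFS =====

-- lexicographic ≤ on events: the order Python's tuple sort and Source B's comparison both use
def leLex (a b : Int × Int) : Prop := a.1 < b.1 ∨ (a.1 = b.1 ∧ a.2 ≤ b.2)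

-- the strict comparison sorted2 uses, for key components fst/snd
def ltp (a b : Int × Int) : Bool :=
  decide (a.1 < b.1) || (!decide (b.1 < a.1) && decide (a.2 < b.2))

lemma ltp_false_iff (a b : Int × Int) : ltp a b = false ↔ leLex b a := by
  simp [ltp, leLex]; omega

lemma leLex_trans {a b c : Int × Int} (h1 : leLex a b) (h2 : leLex b c) : leLex a c := by
  rcases h1 with h1 | h1 <;> rcases h2 with h2 | h2 <;> simp [leLex] at * <;> omega

lemma leLex_total (a b : Int × Int) : leLex a b ∨ leLex b a := by
  simp [leLex]; omega

lemma leLex_antisymm {a b : Int × Int} (h1 : leLex a b) (h2 : leLex b a) : a = b := by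
  rcases a with ⟨a1, a2⟩; rcases b with ⟨b1, b2⟩
  simp [leLex] at *; omega

lemma pairwise_insertBy (x : Int × Int) (acc : List (Int × Int))
    (h : acc.Pairwise leLex) : (PySem.List.insertBy ltp x acc).Pairwise leLex := by
  induction acc with
  | nil => simp [PySem.List.insertBy]
  | cons y ys ih =>
    rcases List.pairwise_cons.mp h with ⟨hy, hys⟩
    by_cases hxy : ltp x y = true
    · have hxyle : leLex x y := by
        rcases leLex_total x y with h' | h'
        · exact h'
        · have := (ltp_false_iff x y).mpr h'
          rw [this] at hxy; exact absurd hxy (by simp)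
      simp only [PySem.List.insertBy, hxy, if_true]
      refine List.pairwise_cons.mpr ⟨?_, h⟩
      intro z hz
      rcases List.mem_cons.mp hz with rfl | hz
      · exact hxyle
      · exact leLex_trans hxyle (hy z hz)
    · have hyxle : leLex y x := (ltp_false_iff x y).mp (Bool.eq_false_iff.mpr hxy)
      simp only [PySem.List.insertBy, hxy]
      refine List.pairwise_cons.mpr ⟨?_, ih hys⟩
      intro z hz
      rcases (PySem.List.mem_insertBy ltp x z ys).mp hz with rfl | hz
      · exact hyxle
      · exact hy z hz

lemma sorted2_eq_foldl (xs : List (Int × Int)) :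
    PySem.List.sorted2 xs Prod.fst Prod.snd =
      xs.foldl (fun acc x => PySem.List.insertBy ltp x acc) [] := rfl

lemma pairwise_sorted2 (xs : List (Int × Int)) :
    (PySem.List.sorted2 xs Prod.fst Prod.snd).Pairwise leLex := by
  rw [sorted2_eq_foldl]
  suffices h : ∀ (acc : List (Int × Int)), acc.Pairwise leLex →
      (xs.foldl (fun acc x => PySem.List.insertBy ltp x acc) acc).Pairwise leLex by
    exact h [] (by simp)
  induction xs with
  | nil => intro acc hacc; simpa using hacc
  | cons x xs ih =>
    intro acc hacc
    exact ih _ (pairwise_insertBy x acc hacc)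

-- any lex-sorted rearrangement of xs IS sorted2 xs fst snd
lemma sorted2_eq_of_perm_of_pairwise (xs ys : List (Int × Int))
    (hp : ys.Perm xs) (hs : ys.Pairwise leLex) :
    PySem.List.sorted2 xs Prod.fst Prod.snd = ys := by
  apply List.Perm.eq_of_pairwise (le := leLex) (l₁ := PySem.List.sorted2 xs Prod.fst Prod.snd) (l₂ := ys)
  · intro a b _ _ h1 h2; exact leLex_antisymm h1 h2
  · exact pairwise_sorted2 xs
  · exact hs
  · exact (PySem.List.sorted2_perm xs Prod.fst Prod.snd false).trans hp.symm

-- the pure merge that mergeGo walks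
def mergeL : List (Int × Int) → List (Int × Int) → List (Int × Int)
  | [], es => es
  | ss, [] => ss
  | s :: ss, e :: es =>
      if e.1 < s.1 ∨ (e.1 = s.1 ∧ e.2 ≤ s.2) then e :: mergeL (s :: ss) es
      else s :: mergeL ss (e :: es)

lemma mergeL_nil_left (es : List (Int × Int)) : mergeL [] es = es := by
  cases es <;> simp [mergeL]

lemma mergeL_nil_right (ss : List (Int × Int)) : mergeL ss [] = ss := by
  cases ss <;> simp [mergeL]

lemma mergeGo_eq_loopA (capacity : Int) (ss es : List (Int × Int)) (curr : Int) :
    mergeGo capacity curr ss es = loopA capacity curr (mergeL ss es) := by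
  induction ss generalizing es curr with
  | nil =>
    induction es generalizing curr with
    | nil => simp [mergeGo, mergeL, loopA]
    | cons e es ihe =>
      simp only [mergeGo, mergeL, loopA]
      by_cases hc : curr + e.2 > capacity
      · simp [hc]
      · simp only [if_neg hc]
        rw [ihe (curr + e.2), mergeL_nil_left]
  | cons s ss ihs =>
    induction es generalizing curr with
    | nil =>
      simp only [mergeGo, mergeL, loopA]
      by_cases hc : curr + s.2 > capacity
      · simp [hc]
      · simp only [if_neg hc]
        rw [ihs [] (curr + s.2), mergeL_nil_right]
    | cons e es ihe =>
      simp only [mergeGo, mergeL]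
      by_cases hcond : e.1 < s.1 ∨ (e.1 = s.1 ∧ e.2 ≤ s.2)
      · simp only [if_pos hcond, loopA]
        by_cases hc : curr + e.2 > capacity
        · simp [hc]
        · simp only [if_neg hc]
          exact ihe (curr + e.2)
      · simp only [if_neg hcond, loopA]
        by_cases hc : curr + s.2 > capacity
        · simp [hc]
        · simp only [if_neg hc]
          exact ihs (e :: es) (curr + s.2)

lemma mergeL_perm (ss es : List (Int × Int)) : (mergeL ss es).Perm (ss ++ es) := by
  induction ss generalizing es with
  | nil => simp [mergeL]
  | cons s ss ihs =>
    induction es with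
    | nil => simp [mergeL]
    | cons e es ihe =>
      simp only [mergeL]
      split_ifs with h
      · exact (ihe.cons e).trans List.perm_middle.symm
      · exact (ihs (e :: es)).cons s

lemma mergeL_pairwise : ∀ (ss es : List (Int × Int)), ss.Pairwise leLex → es.Pairwise leLex →
    (mergeL ss es).Pairwise leLex := by
  intro ss
  induction ss with
  | nil => intro es _ he; simpa [mergeL] using he
  | cons s ss ihs =>
    intro es
    induction es with
    | nil => intro hs _; simpa [mergeL] using hs
    | cons e es ihe =>
      intro hs he
      rcases List.pairwise_cons.mp hs with ⟨hsall, hss⟩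
      rcases List.pairwise_cons.mp he with ⟨heall, hes⟩
      simp only [mergeL]
      split_ifs with h
      · refine List.pairwise_cons.mpr ⟨?_, ihe hs hes⟩
        intro z hz
        have hz' : z ∈ (s :: ss) ++ es := (mergeL_perm (s :: ss) es).mem_iff.mp hz
        rcases List.mem_append.mp hz' with hz' | hz'
        · rcases List.mem_cons.mp hz' with rfl | hz''
          · exact h
          · exact leLex_trans h (hsall z hz'')
        · exact heall z hz'
      · have hse : leLex s e := by unfold leLex; omega
        refine List.pairwise_cons.mpr ⟨?_, ihs (e :: es) hss he⟩
        intro z hz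
        have hz' : z ∈ ss ++ (e :: es) := (mergeL_perm ss (e :: es)).mem_iff.mp hz
        rcases List.mem_append.mp hz' with hz' | hz'
        · exact hsall z hz'
        · rcases List.mem_cons.mp hz' with rfl | hz''
          · exact hse
          · exact leLex_trans hse (heall z hz'')

-- A's interleaved event list is a rearrangement of (start events) ++ (end events)
lemma flatMap_perm_maps (trips : List (Int × Int × Int)) :
    (trips.flatMap (fun t => [(t.1, t.2.2), (t.2.1, -t.2.2)])).Perm
      (trips.map (fun t => (t.1, t.2.2)) ++ trips.map (fun t => (t.2.1, -t.2.2))) := by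
  induction trips with
  | nil => simp
  | cons t ts ih =>
    simp only [List.flatMap_cons, List.map_cons, List.cons_append]
    show ((t.1, t.2.2) :: (t.2.1, -t.2.2) :: ts.flatMap (fun t => [(t.1, t.2.2), (t.2.1, -t.2.2)])).Perm
      ((t.1, t.2.2) :: (ts.map (fun t => (t.1, t.2.2)) ++ (t.2.1, -t.2.2) :: ts.map (fun t => (t.2.1, -t.2.2))))
    exact ((ih.cons _).trans List.perm_middle.symm).cons _

lemma events_eq_flatMap (trips : List (Int × Int × Int)) :
    trips.foldl (fun acc t => (acc ++ [(t.1, t.2.2)]) ++ [(t.2.1, -t.2.2)]) [] =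
      trips.flatMap (fun t => [(t.1, t.2.2), (t.2.1, -t.2.2)]) := by
  have h : trips.foldl (fun acc t => (acc ++ [(t.1, t.2.2)]) ++ [(t.2.1, -t.2.2)]) [] =
      trips.foldl (fun acc t => acc ++ [(t.1, t.2.2), (t.2.1, -t.2.2)]) [] := by
    apply PySem.List.foldl_congr_mem
    intro acc t _; simp
  rw [h, PySem.List.foldl_append_eq_flatMap]
  simp

-- ===== VERDICT (by name: the statement is the Claim_ definition above) =====
theorem solve_spec : Claim_equal_solve := by
  intro trips capacity _
  show solve trips capacity = solve_alt trips capacity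
  show loopA capacity 0
      (PySem.List.sorted2 (trips.foldl (fun acc t => (acc ++ [(t.1, t.2.2)]) ++ [(t.2.1, -t.2.2)]) []) Prod.fst Prod.snd) =
    mergeGo capacity 0 (PySem.List.sorted2 (trips.map (fun t => (t.1, t.2.2))) Prod.fst Prod.snd)
      (PySem.List.sorted2 (trips.map (fun t => (t.2.1, -t.2.2))) Prod.fst Prod.snd)
  rw [mergeGo_eq_loopA]
  have hs := pairwise_sorted2 (trips.map (fun t => (t.1, t.2.2)))
  have he := pairwise_sorted2 (trips.map (fun t => (t.2.1, -t.2.2)))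
  have hperm : (mergeL (PySem.List.sorted2 (trips.map (fun t => (t.1, t.2.2))) Prod.fst Prod.snd)
      (PySem.List.sorted2 (trips.map (fun t => (t.2.1, -t.2.2))) Prod.fst Prod.snd)).Perm
      (trips.foldl (fun acc t => (acc ++ [(t.1, t.2.2)]) ++ [(t.2.1, -t.2.2)]) []) := by
    refine (mergeL_perm _ _).trans ?_
    rw [events_eq_flatMap]
    exact ((PySem.List.sorted2_perm _ _ _ false).append
      (PySem.List.sorted2_perm _ _ _ false)).trans (flatMap_perm_maps trips).symm
  rw [sorted2_eq_of_perm_of_pairwise _ _ hperm (mergeL_pairwise _ _ hs he)]
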